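-- pv_equiv track=rewrite | github.com/MrMinderbinder/e-Calculator | e_calc.py | taylor
-- ===== SOURCE A (Python) =====
-- def taylor(digits):
--     term = 10 ** (int(digits) + 10)
--     k = 2
--     e = k * term
--
--     while term:
--         term //= k
--         e += term
--         k += 1
--
--     return e
-- ===== SOURCE B (Python) =====
-- def taylor(digits):
--     # two staged passes: extract the factorial-base digits of T (r, d = divmod(r, k)),
--     # then add up d * w with the weight recurrence w -> w*k + 1; equal to A because
--     # the weight of the digit at position k is 1 + k*(1 + (k+1)*(...)) = sum of the
--     # reciprocals of the partial factorials, so sum(d*w) telescopes to A's quotient sum.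
--     T = 10 ** (int(digits) + 10)
--     digs = []
--     r, k = T, 2
--     while r:
--         r, d = divmod(r, k)
--         digs.append(d)
--         k += 1
--     e, w = 2 * T, 0
--     for j, d in enumerate(digs):
--         e += d * w
--         w = w * (j + 2) + 1
--     return e
-- ===== Notes on version B (the rewrite author's own statement) =====
-- stated objective: alternative
-- what changed: B runs two staged passes -- first extracting the factorial-base digit list of the scaled numerator T via divmod, then folding a remainder-weighted sum (e += d*w with the weight recurrence w = w*k + 1) over that list -- instead of A's single loop that keeps dividing a running quotient and adding it; Pre_ excludes digits < -10, where Python's 10**(digits+10) is a float so A returns a float, not an int.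
-- outside the precondition, e.g. on taylor(-11): A returns 0.2, B returns 0.2
import Mathlib
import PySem

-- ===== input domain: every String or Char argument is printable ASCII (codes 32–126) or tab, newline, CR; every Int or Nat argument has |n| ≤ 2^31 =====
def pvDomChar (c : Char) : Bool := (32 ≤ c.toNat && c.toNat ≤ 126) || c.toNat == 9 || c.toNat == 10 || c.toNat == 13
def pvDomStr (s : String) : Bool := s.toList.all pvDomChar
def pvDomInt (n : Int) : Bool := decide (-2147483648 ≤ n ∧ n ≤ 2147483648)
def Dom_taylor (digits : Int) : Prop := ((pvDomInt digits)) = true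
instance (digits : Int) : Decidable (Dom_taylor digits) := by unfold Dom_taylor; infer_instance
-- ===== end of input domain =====

-- B extracts the factorial-base digits of T in one pass and then folds a weighted sum
-- (e += d*w, w = w*k + 1) over that digit list, instead of A's single loop that
-- accumulates the running quotient; objective: alternative.


-- ===== PORT A =====
-- while term: term //= k; e += term; k += 1  — the fuel parameter only makes the loop
-- total; term.toNat + 1 is ample fuel since term strictly decreases while nonzero.
def taylorLoopA (fuel : Nat) (term e k : Int) : Int :=
  match fuel with
  | 0 => e
  | fuel + 1 =>
    if term ≠ 0 then
      let term' := PySem.Int.floordiv term k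
      taylorLoopA fuel term' (e + term') (k + 1)
    else e

def taylor (digits : Int) : Int :=
  let term : Int := (10 : Int) ^ (digits + 10).toNat
  let k : Int := 2
  let e : Int := k * term
  taylorLoopA (term.toNat + 1) term e k

-- ===== PORT B =====
-- first pass: while r: r, d = divmod(r, k); digs.append(d); k += 1  (fuel: totality only)
def digitList (fuel : Nat) (r k : Int) : List Int :=
  match fuel with
  | 0 => []
  | fuel + 1 =>
    if r ≠ 0 then PySem.Int.mod r k :: digitList fuel (PySem.Int.floordiv r k) (k + 1)
    else []

-- second pass: for j, d in enumerate(digs): e += d*w; w = w*(j+2) + 1  (k = j + 2)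
def sumWeighted : List Int → Int → Int → Int → Int
  | [], e, _, _ => e
  | d :: ds, e, w, k => sumWeighted ds (e + d * w) (w * k + 1) (k + 1)

def taylor_alt (digits : Int) : Int :=
  let T : Int := (10 : Int) ^ (digits + 10).toNat
  let digs := digitList (T.toNat + 1) T 2
  sumWeighted digs (2 * T) 0 2

-- ===== PRECONDITION & SPEC =====
-- Pre_ excludes digits < -10: there Python's 10**(digits+10) is a float, so A (and B
-- alike) return a float such as 0.2, not a value of the declared Int type.
def Pre_taylor (digits : Int) : Prop := -10 ≤ digits
instance (digits : Int) : Decidable (Pre_taylor digits) := by unfold Pre_taylor; infer_instance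
def pvWitness_taylor : Int := 3

def Spec_taylor (digits : Int) (out : Int) : Prop := out = taylor_alt digits
instance (digits : Int) (out : Int) : Decidable (Spec_taylor digits out) := by unfold Spec_taylor; infer_instance

-- ===== CLAIM =====
def Claim_equal_taylor : Prop := ∀ (digits : Int), Dom_taylor digits → Pre_taylor digits → Spec_taylor digits (taylor digits)

-- ===== LEMMAS AND PROOFS =====

lemma ediv_lt_self_of (q k : Int) (hq : 0 < q) (hk : 2 ≤ k) : q / k < q := by
  have hk0 : (0:Int) ≤ k := by omega
  rcases Int.eq_ofNat_of_zero_le hq.le with ⟨qn, rfl⟩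
  rcases Int.eq_ofNat_of_zero_le hk0 with ⟨kn, rfl⟩
  rw [← Int.natCast_div]
  have h1 : 0 < qn := by exact_mod_cast hq
  have h2 : 1 < kn := by exact_mod_cast (show (1:Int) < (kn:Int) by omega)
  exact_mod_cast Nat.div_lt_self h1 h2

-- Transfer invariant: folding the weighted sum over the digit stream of r starting from
-- (e, w, k) computes what A's quotient loop computes from (r, e + w*r, k).
lemma sumWeighted_digitList : ∀ (n : Nat) (r e w k : Int),
    0 ≤ r → 2 ≤ k → r.toNat < n →
    sumWeighted (digitList n r k) e w k = taylorLoopA n r (e + w * r) k := by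
  intro n
  induction n with
  | zero => intro r e w k _ _ h; omega
  | succ n ih =>
    intro r e w k hr hk hfuel
    by_cases hz : r = 0
    · simp [digitList, sumWeighted, taylorLoopA, hz]
    · have hrpos : 0 < r := lt_of_le_of_ne hr (Ne.symm hz)
      have hfl : PySem.Int.floordiv r k = r / k :=
        PySem.Int.floordiv_eq_ediv_of_pos (by omega)
      have hr' : 0 ≤ r / k := Int.ediv_nonneg hr (by omega)
      have hlt : r / k < r := ediv_lt_self_of r k hrpos hk
      have hid : PySem.Int.floordiv r k * k + PySem.Int.mod r k = r :=
        PySem.Int.floordiv_mul_add_mod r k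
      have hacc : e + PySem.Int.mod r k * w + (w * k + 1) * (r / k)
          = e + w * r + r / k := by
        rw [hfl] at hid; linear_combination w * hid
      have hstep := ih (r / k) (e + PySem.Int.mod r k * w) (w * k + 1) (k + 1)
        hr' (by omega) (by omega)
      have hB : digitList (n + 1) r k
          = PySem.Int.mod r k :: digitList n (r / k) (k + 1) := by
        simp [digitList, hz, hfl]
      have hA : taylorLoopA (n + 1) r (e + w * r) k
          = taylorLoopA n (r / k) (e + w * r + r / k) (k + 1) := by
        simp only [taylorLoopA, if_pos hz, hfl]
      rw [hB, hA]
      show sumWeighted (digitList n (r / k) (k + 1)) (e + PySem.Int.mod r k * w) (w * k + 1) (k + 1)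
          = taylorLoopA n (r / k) (e + w * r + r / k) (k + 1)
      rw [hstep, hacc]

-- ===== VERDICT =====
theorem taylor_spec : Claim_equal_taylor := by
  intro digits _ _
  unfold Spec_taylor taylor taylor_alt
  have hT : (0:Int) < (10 : Int) ^ (digits + 10).toNat := by positivity
  generalize hTe : (10 : Int) ^ (digits + 10).toNat = T at *
  show taylorLoopA (T.toNat + 1) T (2 * T) 2 = sumWeighted (digitList (T.toNat + 1) T 2) (2 * T) 0 2
  have := sumWeighted_digitList (T.toNat + 1) T (2 * T) 0 2 (by omega) (by omega) (by omega)
  rw [this]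
  ring_nf
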